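-- pv_equiv track=rewrite | github.com/Arsen1302/Code-copy-detector | TestData/solutions/problem_771_4.py | solution_771_4
-- ===== SOURCE A (Python) =====
-- def solution_771_4(text: str) -> int:
--     begin, end = 0, len(text) - 1
--     count = 0
--
--     left, right = [], []
--
--     for i in range(len(text)):
--         left.append(text[i])
--         right.append(text[len(text) - i - 1])
--
--         if left == list(reversed(right)):
--             count += 1
--             left, right = [], []
--
--     return count
-- ===== SOURCE B (Python) =====
-- def solution_771_4(text: str) -> int:
--     BASE = 0x110000  # > any Unicode code point, so hash equality is exact content equality
--     count = 0
--     hl = hr = 0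
--     pw = 1
--     for a, b in zip(text, reversed(text)):
--         hl = hl * BASE + ord(a)          # left block, most-significant-first
--         hr = hr + ord(b) * pw            # right block, least-significant-first
--         pw *= BASE
--         if hl == hr:
--             count += 1
--             hl = hr = 0
--             pw = 1
--     return count
-- ===== Notes on version B (the rewrite author's own statement) =====
-- stated objective: alternative
-- what changed: B replaces A's growing left/right character lists and the per-iteration list-reversal-and-compare by two exact positional big-int hashes in base 0x110000 (greater than any code point, so hash equality is exactly block equality), updated arithmetically each step over zip(text, reversed(text)).
import Mathlib
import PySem

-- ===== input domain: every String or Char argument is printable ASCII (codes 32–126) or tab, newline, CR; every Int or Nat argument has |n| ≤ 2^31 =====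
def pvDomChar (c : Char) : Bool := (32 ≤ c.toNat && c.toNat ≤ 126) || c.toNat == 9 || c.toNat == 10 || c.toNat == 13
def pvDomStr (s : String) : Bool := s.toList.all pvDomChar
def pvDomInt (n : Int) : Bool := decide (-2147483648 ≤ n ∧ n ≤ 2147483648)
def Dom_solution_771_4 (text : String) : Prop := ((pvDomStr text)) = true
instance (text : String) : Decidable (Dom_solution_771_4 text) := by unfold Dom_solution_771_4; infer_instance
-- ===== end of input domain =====

-- B replaces A's growing left/right lists and per-step list-reversal comparison by two
-- exact positional big-int hashes (base 0x110000 > any code point, so hash equality IS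
-- block equality), updated arithmetically each step; objective: alternative.

-- ===== PORT A =====
-- literal transliteration of A; `begin`/`end` of the Python are unused and omitted;
-- indices are always in range, so text[i] is ported with pyGetD (default never used)
def solution_771_4 (text : String) : Int :=
  ((PySem.List.pyRange 0 (text.toList.length : Int) 1).foldl
    (fun (st : Int × List Char × List Char) i =>
      let left := st.2.1 ++ [PySem.List.pyGetD text.toList i ' ']
      let right := st.2.2 ++ [PySem.List.pyGetD text.toList ((text.toList.length : Int) - i - 1) ' ']
      if left = right.reverse then (st.1 + 1, ([] : List Char), ([] : List Char))
      else (st.1, left, right))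
    (0, [], [])).1

-- ===== PORT B =====
-- literal transliteration of Source B: zip(text, reversed(text)), two rolling hashes, a power
def solution_771_4_alt (text : String) : Int :=
  ((text.toList.zip text.toList.reverse).foldl
    (fun (st : Int × Nat × Nat × Nat) p =>
      let hl := st.2.1 * 1114112 + p.1.toNat
      let hr := st.2.2.1 + p.2.toNat * st.2.2.2
      let pw := st.2.2.2 * 1114112
      if hl = hr then (st.1 + 1, 0, 0, 1) else (st.1, hl, hr, pw))
    (0, 0, 0, 1)).1

-- ===== PRECONDITION & SPEC =====
def Spec_solution_771_4 (text : String) (out : Int) : Prop := out = solution_771_4_alt text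
instance (text : String) (out : Int) : Decidable (Spec_solution_771_4 text out) := by unfold Spec_solution_771_4; infer_instance

-- ===== CLAIM (what is proved, stated in full; the proofs are below) =====
def Claim_equal_solution_771_4 : Prop := ∀ (text : String), Dom_solution_771_4 text → Spec_solution_771_4 text (solution_771_4 text)

-- ===== LEMMAS AND PROOFS =====

-- A's loop step, on the pair (text[i], text[n-1-i])
def pvStepA (st : Int × List Char × List Char) (p : Char × Char) : Int × List Char × List Char :=
  let left := st.2.1 ++ [p.1]
  let right := st.2.2 ++ [p.2]
  if left = right.reverse then (st.1 + 1, [], []) else (st.1, left, right)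

-- B's loop step
def pvStepB (st : Int × Nat × Nat × Nat) (p : Char × Char) : Int × Nat × Nat × Nat :=
  let hl := st.2.1 * 1114112 + p.1.toNat
  let hr := st.2.2.1 + p.2.toNat * st.2.2.2
  let pw := st.2.2.2 * 1114112
  if hl = hr then (st.1 + 1, 0, 0, 1) else (st.1, hl, hr, pw)

-- most-significant-first hash of the left block
def pvEncL (l : List Char) : Nat := l.foldl (fun a c => a * 1114112 + c.toNat) 0

-- least-significant-first hash of the right block
def pvEncR (r : List Char) : Nat := Nat.ofDigits 1114112 (r.map Char.toNat)

theorem pvChar_lt (c : Char) : c.toNat < 1114112 := by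
  have h := c.valid
  rcases h with h | ⟨_, h⟩ <;> exact Nat.lt_of_lt_of_le h (by norm_num)

theorem pvEncL_acc (l : List Char) : ∀ acc : Nat,
    l.foldl (fun a c => a * 1114112 + c.toNat) acc
      = acc * 1114112 ^ l.length + Nat.ofDigits 1114112 (l.map Char.toNat).reverse := by
  induction l with
  | nil => intro acc; simp
  | cons c l ih =>
      intro acc
      simp only [List.foldl_cons, List.map_cons, List.reverse_cons, List.length_cons]
      rw [ih, Nat.ofDigits_append]
      simp [Nat.ofDigits_singleton, pow_succ]
      ring

theorem pvEncL_eq (l : List Char) :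
    pvEncL l = Nat.ofDigits 1114112 (l.map Char.toNat).reverse := by
  simpa using pvEncL_acc l 0

theorem pvEnc_eq_iff (l r : List Char) (hlen : l.length = r.length) :
    (pvEncL l = pvEncR r) ↔ l = r.reverse := by
  constructor
  · intro h
    rw [pvEncL_eq] at h
    have hd : (l.map Char.toNat).reverse = r.map Char.toNat := by
      refine Nat.ofDigits_inj_of_len_eq (by norm_num) ?_ ?_ ?_ h
      · simpa using hlen
      · intro x hx
        simp only [List.mem_reverse, List.mem_map] at hx
        obtain ⟨c, _, rfl⟩ := hx; exact pvChar_lt c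
      · intro x hx
        simp only [List.mem_map] at hx
        obtain ⟨c, _, rfl⟩ := hx; exact pvChar_lt c
    have : l.reverse.map Char.toNat = r.map Char.toNat := by
      rw [List.map_reverse]; exact hd
    have hinj : Function.Injective Char.toNat := by
      intro a b hab
      exact Char.ext (by exact UInt32.toNat_inj.mp hab)
    have := List.map_injective_iff.mpr hinj this
    rw [← this, List.reverse_reverse]
  · intro h
    subst h
    rw [pvEncL_eq, pvEncR, List.map_reverse, List.reverse_reverse]

-- main invariant: the two folds keep matching states
theorem pvMain (ps : List (Char × Char)) : ∀ (c : Int) (l r : List Char) (hl hr pw : Nat),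
    hl = pvEncL l → hr = pvEncR r → pw = 1114112 ^ r.length → l.length = r.length →
    (ps.foldl pvStepA (c, l, r)).1 = (ps.foldl pvStepB (c, hl, hr, pw)).1 := by
  induction ps with
  | nil => intro c l r hl hr pw _ _ _ _; rfl
  | cons p ps ih =>
      intro c l r hl hr pw h1 h2 h3 hlen
      simp only [List.foldl_cons]
      have hL : pvEncL (l ++ [p.1]) = hl * 1114112 + p.1.toNat := by
        rw [h1, pvEncL, pvEncL, List.foldl_append]; rfl
      have hR : pvEncR (r ++ [p.2]) = hr + p.2.toNat * pw := by
        rw [h2, h3, pvEncR, pvEncR, List.map_append, Nat.ofDigits_append]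
        simp [Nat.ofDigits_singleton]
        ring
      have hcond : (l ++ [p.1] = (r ++ [p.2]).reverse)
          ↔ (hl * 1114112 + p.1.toNat = hr + p.2.toNat * pw) := by
        rw [← hL, ← hR]
        exact (pvEnc_eq_iff _ _ (by simp [hlen])).symm
      by_cases h : l ++ [p.1] = (r ++ [p.2]).reverse
      · have hB : hl * 1114112 + p.1.toNat = hr + p.2.toNat * pw := hcond.mp h
        simp only [pvStepA, pvStepB, h, hB, if_true]
        exact ih (c + 1) [] [] 0 0 1 rfl rfl rfl rfl
      · have hB : ¬ (hl * 1114112 + p.1.toNat = hr + p.2.toNat * pw) := fun hx => h (hcond.mpr hx)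
        simp only [pvStepA, pvStepB, if_neg h, if_neg hB]
        exact ih c (l ++ [p.1]) (r ++ [p.2]) _ _ _ hL.symm hR.symm
          (by rw [h3]; simp [pow_succ]) (by simp [hlen])

-- A's fold over range(len) with the two indexed gets is the fold of pvStepA over zip cs cs.reverse
theorem pvZip_eq_map_range (cs : List Char) :
    cs.zip cs.reverse
      = (List.range cs.length).map
          (fun k => (cs.getD k ' ', cs.getD (cs.length - 1 - k) ' ')) := by
  apply List.ext_getElem
  · simp
  · intro k h1 h2
    simp only [List.length_zip, List.length_reverse, Nat.min_self] at h1
    have h3 : cs.length - 1 - k < cs.length := by omega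
    simp [List.getElem_zip, List.getElem_reverse, List.getD_eq_getElem?_getD,
      h1, h3]

theorem pvBridgeA (cs : List Char) (init : Int × List Char × List Char) :
    (PySem.List.pyRange 0 (cs.length : Int) 1).foldl
      (fun (st : Int × List Char × List Char) i =>
        let left := st.2.1 ++ [PySem.List.pyGetD cs i ' ']
        let right := st.2.2 ++ [PySem.List.pyGetD cs ((cs.length : Int) - i - 1) ' ']
        if left = right.reverse then (st.1 + 1, ([] : List Char), ([] : List Char))
        else (st.1, left, right))
      init
    = (cs.zip cs.reverse).foldl pvStepA init := by
  rw [pvZip_eq_map_range, List.foldl_map, PySem.List.pyRange_one, List.foldl_map]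
  simp only [Int.sub_zero, Int.toNat_natCast]
  apply PySem.List.foldl_congr_mem
  intro st k hk
  have hk' : k < cs.length := List.mem_range.mp hk
  have e1 : PySem.List.pyGetD cs ((0 : Int) + (k : Int)) ' ' = cs.getD k ' ' := by
    rw [Int.zero_add, PySem.List.pyGetD_natCast]
  have e2 : PySem.List.pyGetD cs ((cs.length : Int) - ((0 : Int) + (k : Int)) - 1) ' '
      = cs.getD (cs.length - 1 - k) ' ' := by
    have : ((cs.length : Int) - ((0 : Int) + (k : Int)) - 1) = ((cs.length - 1 - k : Nat) : Int) := by
      omega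
    rw [this, PySem.List.pyGetD_natCast]
  simp only [e1, e2, pvStepA]

-- ===== VERDICT (by name: the statement is the Claim_ definition above) =====
theorem solution_771_4_spec : Claim_equal_solution_771_4 := by
  intro text _
  unfold Spec_solution_771_4 solution_771_4 solution_771_4_alt
  rw [pvBridgeA text.toList]
  exact pvMain _ 0 [] [] 0 0 1 rfl rfl rfl rfl
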